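-- pv_equiv track=rewrite | github.com/Aguilafiel/proyecto_inicial_python | funciones.py | validar_palabra
-- ===== SOURCE A (Python) =====
-- def validar_palabra(letras_usadas, palabra_secreta):
--     contador = 0
--     for letra in palabra_secreta:
--         if letra  in letras_usadas:
--             contador  += 1
--         else:
--             contador = 0
--
--
--     if contador == len(palabra_secreta):
--         return(True)
--     else:
--         return(False)
-- ===== SOURCE B (Python) =====
-- def validar_palabra(letras_usadas, palabra_secreta):
--     return set(palabra_secreta).issubset(letras_usadas)
-- ===== Notes on version B (the rewrite author's own statement) =====
-- stated objective: faster
-- what changed: Replaces the stateful consecutive-hit counter loop (reset to 0 on a miss, compared to len at the end) with a dedupe-then-subset test: build the set of distinct letters of the word and check it is a subset of the used letters.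
import Mathlib
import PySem

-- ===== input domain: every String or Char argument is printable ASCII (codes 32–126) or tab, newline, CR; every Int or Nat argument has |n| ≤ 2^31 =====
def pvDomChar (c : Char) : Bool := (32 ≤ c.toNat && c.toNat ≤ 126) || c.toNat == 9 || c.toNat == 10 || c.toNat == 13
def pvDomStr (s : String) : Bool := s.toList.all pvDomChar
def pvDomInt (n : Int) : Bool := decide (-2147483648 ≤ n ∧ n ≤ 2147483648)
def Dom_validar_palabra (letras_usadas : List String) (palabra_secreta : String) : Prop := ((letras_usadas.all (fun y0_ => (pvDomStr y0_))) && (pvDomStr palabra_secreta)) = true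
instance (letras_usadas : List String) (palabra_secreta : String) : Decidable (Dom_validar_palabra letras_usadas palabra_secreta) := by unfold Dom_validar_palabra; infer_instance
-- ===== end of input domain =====

-- B replaces A's consecutive-hit counter loop with a dedupe-then-subset test (set of the word's distinct letters ⊆ used letters); measured faster on the generated inputs.



-- ===== PORT A =====
def validar_palabra (letras_usadas : List String) (palabra_secreta : String) : Bool :=
  -- literal transliteration of A: a counter incremented on hit, reset to 0 on miss, compared to len at the end
  let contador : Int := palabra_secreta.toList.foldl
    (fun contador letra => if letras_usadas.contains (String.singleton letra) then contador + 1 else 0) 0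
  if contador = PySem.Str.len palabra_secreta then true else false

-- ===== PORT B =====
-- B: the set of distinct letters of the word is a subset of the used letters
def validar_palabra_alt (letras_usadas : List String) (palabra_secreta : String) : Bool :=
  PySem.Set.issubset (PySem.Set.ofList (palabra_secreta.toList.map String.singleton)) letras_usadas

-- ===== PRECONDITION & SPEC =====
def Spec_validar_palabra (letras_usadas : List String) (palabra_secreta : String) (out : Bool) : Prop := out = validar_palabra_alt letras_usadas palabra_secreta
instance (letras_usadas : List String) (palabra_secreta : String) (out : Bool) : Decidable (Spec_validar_palabra letras_usadas palabra_secreta out) := by unfold Spec_validar_palabra; infer_instance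

-- ===== CLAIM (what is proved, stated in full; the proofs are below) =====
def Claim_equal_validar_palabra : Prop := ∀ (letras_usadas : List String) (palabra_secreta : String), Dom_validar_palabra letras_usadas palabra_secreta → Spec_validar_palabra letras_usadas palabra_secreta (validar_palabra letras_usadas palabra_secreta)

-- ===== LEMMAS AND PROOFS =====

-- A's loop state, abstracted over the membership predicate P
def pvLoop (P : Char → Bool) (l : List Char) (c : Int) : Int :=
  l.foldl (fun contador letra => if P letra then contador + 1 else 0) c

theorem pvLoop_le (P : Char → Bool) (l : List Char) :
    ∀ c : Int, 0 ≤ c → pvLoop P l c ≤ c + l.length := by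
  induction l with
  | nil => intro c hc; simp [pvLoop]
  | cons ch t ih =>
    intro c hc
    by_cases h : P ch = true
    · have := ih (c + 1) (by omega)
      simp [pvLoop, List.foldl, h] at this ⊢
      omega
    · have := ih 0 (by omega)
      simp [pvLoop, List.foldl, h] at this ⊢
      omega

theorem pvLoop_eq_iff (P : Char → Bool) (l : List Char) :
    ∀ c : Int, 0 ≤ c → (pvLoop P l c = c + l.length ↔ ∀ ch ∈ l, P ch = true) := by
  induction l with
  | nil => intro c hc; simp [pvLoop]
  | cons ch t ih =>
    intro c hc
    by_cases h : P ch = true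
    · have := ih (c + 1) (by omega)
      simp [pvLoop, List.foldl, h] at this ⊢
      rw [show c + (↑t.length + 1) = c + 1 + ↑t.length by ring]
      exact this
    · have hle := pvLoop_le P t 0 (by omega)
      simp [pvLoop, List.foldl, h] at hle ⊢
      intro habs
      omega

theorem validar_palabra_eq_alt (letras_usadas : List String) (palabra_secreta : String) :
    validar_palabra letras_usadas palabra_secreta = validar_palabra_alt letras_usadas palabra_secreta := by
  have hA : validar_palabra letras_usadas palabra_secreta = true ↔
      pvLoop (fun letra => letras_usadas.contains (String.singleton letra))
        palabra_secreta.toList 0 = PySem.Str.len palabra_secreta := by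
    simp [validar_palabra, pvLoop]
  have hlen : PySem.Str.len palabra_secreta = (palabra_secreta.toList.length : Int) := by
    rw [PySem.Str.len_eq]
  have hiff := pvLoop_eq_iff (fun letra => letras_usadas.contains (String.singleton letra))
    palabra_secreta.toList 0 le_rfl
  rw [zero_add] at hiff
  rw [Bool.eq_iff_iff, hA, hlen, hiff]
  rw [show validar_palabra_alt letras_usadas palabra_secreta = true ↔
      ∀ x ∈ PySem.Set.ofList (List.map String.singleton palabra_secreta.toList), x ∈ letras_usadas from
    by unfold validar_palabra_alt; exact PySem.Set.issubset_iff _ _]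
  constructor
  · intro h x hx
    rw [PySem.Set.mem_ofList, List.mem_map] at hx
    obtain ⟨ch, hch, rfl⟩ := hx
    simpa using h ch hch
  · intro h ch hch
    have := h (String.singleton ch)
      (by rw [PySem.Set.mem_ofList, List.mem_map]; exact ⟨ch, hch, rfl⟩)
    simpa using this

-- ===== VERDICT (by name: the statement is the Claim_ definition above) =====
theorem validar_palabra_spec : Claim_equal_validar_palabra := by
  intro letras_usadas palabra_secreta _
  exact validar_palabra_eq_alt letras_usadas palabra_secreta
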